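-- pv_equiv track=rewrite | github.com/jyu197/comp_sci_101 | apt9/PositiveID.py | maximumFacts
-- ===== SOURCE A (Python) =====
-- def maximumFacts(suspects):
--     most = 0
--     for i in range(len(suspects)):
--         suspects[i] = suspects[i].split(",")
--     for i in range(len(suspects)):
--         for j in range(len(suspects)):
--             if i == j:
--                 continue
--             common = len(set(suspects[i]) & set(suspects[j]))
--             if common > most:
--                 most = common
--     return most
-- ===== SOURCE B (Python) =====
-- def maximumFacts(suspects):
--     # Same observable in-place mutation as the original: split each entry.
--     for i in range(len(suspects)):
--         suspects[i] = suspects[i].split(",")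
--     # Inverted index: fact -> ordered list of suspect indices holding it (deduped per suspect).
--     index = {}
--     for i, facts in enumerate(suspects):
--         for fact in dict.fromkeys(facts):
--             index[fact] = index.get(fact, []) + [i]
--     # Co-occurrence counting: each fact contributes 1 to every unordered pair of its suspects.
--     counts = {}
--     for fact in index:
--         idxs = index[fact]
--         for x in range(len(idxs)):
--             for y in range(x + 1, len(idxs)):
--                 key = (idxs[x], idxs[y])
--                 counts[key] = counts.get(key, 0) + 1
--     return max(counts.values(), default=0)
-- ===== Notes on version B (the rewrite author's own statement) =====
-- stated objective: alternative
-- what changed: Replaces the all-pairs set-intersection scan with an inverted index (fact -> suspect indices) followed by co-occurrence pair counting, returning the maximum pair count.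
import Mathlib
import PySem

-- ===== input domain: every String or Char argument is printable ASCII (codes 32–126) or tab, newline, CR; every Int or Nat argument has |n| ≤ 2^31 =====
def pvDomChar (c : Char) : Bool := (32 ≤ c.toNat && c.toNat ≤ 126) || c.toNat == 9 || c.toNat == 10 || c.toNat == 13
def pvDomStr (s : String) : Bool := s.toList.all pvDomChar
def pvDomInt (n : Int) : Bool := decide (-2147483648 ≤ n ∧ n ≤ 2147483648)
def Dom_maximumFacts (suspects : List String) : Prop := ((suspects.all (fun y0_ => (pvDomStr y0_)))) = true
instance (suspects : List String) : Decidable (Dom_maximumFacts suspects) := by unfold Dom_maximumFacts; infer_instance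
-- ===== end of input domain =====

-- B replaces A's all-pairs set-intersection scan by an inverted index (fact -> suspect indices)
-- and co-occurrence pair counting (objective: alternative; cost depends on how many pairs co-occur).
-- Both Pythons mutate the argument in place identically (split each entry); the equivalence
-- proved here is about the RETURN value.

-- s.split(",") — exact: PySem.Chars.splitOn is Python's str.split with a nonempty separator
def pvSplit (s : String) : List String := (PySem.Chars.splitOn s.toList [',']).map String.ofList

-- ===== PORT A =====
def maximumFacts (suspects : List String) : Int :=
  let sp := suspects.map pvSplit
  (PySem.List.pyRange 0 (sp.length : Int) 1).foldl (fun most i =>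
    (PySem.List.pyRange 0 (sp.length : Int) 1).foldl (fun most j =>
      if i == j then most
      else
        let common : Int :=
          ((PySem.Set.inter (PySem.Set.ofList (PySem.List.pyGetD sp i ([] : List String)))
            (PySem.Set.ofList (PySem.List.pyGetD sp j ([] : List String)))).length : Int)
        if common > most then common else most) most) 0

-- ===== PORT B =====
def maximumFacts_alt (suspects : List String) : Int :=
  let sp := suspects.map pvSplit
  let index : PySem.Dict String (List Int) :=
    (PySem.List.enumerate sp).foldl (fun d p =>
      (PySem.List.dedup p.2).foldl (fun d fact => d.modify fact [] (fun l => l ++ [p.1])) d)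
      PySem.Dict.empty
  let counts : PySem.Dict (Int × Int) Int :=
    index.keys.foldl (fun cdict fact =>
      let idxs := index.getD fact []
      (PySem.List.pyRange 0 (idxs.length : Int) 1).foldl (fun cdict x =>
        (PySem.List.pyRange (x + 1) (idxs.length : Int) 1).foldl (fun cdict y =>
          cdict.modify (PySem.List.pyGetD idxs x 0, PySem.List.pyGetD idxs y 0) 0 (· + 1))
          cdict) cdict) PySem.Dict.empty
  PySem.List.maxD counts.values (fun v => v) 0

-- ===== PRECONDITION & SPEC =====
def Spec_maximumFacts (suspects : List String) (out : Int) : Prop := out = maximumFacts_alt suspects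
instance (suspects : List String) (out : Int) : Decidable (Spec_maximumFacts suspects out) := by unfold Spec_maximumFacts; infer_instance

-- ===== CLAIM (what is proved, stated in full; the proofs are below) =====
def Claim_equal_maximumFacts : Prop := ∀ (suspects : List String), Dom_maximumFacts suspects → Spec_maximumFacts suspects (maximumFacts suspects)

-- ===== LEMMAS AND PROOFS =====

-- proof-side abbreviations
def pvC (l : List (List String)) (i j : Int) : Int :=
  ((PySem.Set.inter (PySem.Set.ofList (PySem.List.pyGetD l i ([] : List String)))
    (PySem.Set.ofList (PySem.List.pyGetD l j ([] : List String)))).length : Int)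

def pvL (l : List (List String)) : List (String × Int) :=
  (PySem.List.enumerate l).flatMap (fun p => (PySem.List.dedup p.2).map (fun f => (f, p.1)))

def pvOcc (l : List (List String)) (c : String) : List Int :=
  ((pvL l).filter (fun q => q.1 == c)).map (·.2)

def pvPairs : List Int → List (Int × Int)
  | [] => []
  | h :: t => t.map (fun b => (h, b)) ++ pvPairs t

def pvK (l : List (List String)) : List (Int × Int) :=
  (PySem.Set.ofList ((pvL l).map (·.1))).flatMap (fun c => pvPairs (pvOcc l c))

-- generic loop-shape lemmas
theorem pv_foldl_nested_pair {α β γ : Type} (l : List α) (g : α → List β) (F : γ → α × β → γ)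
    (init : γ) :
    l.foldl (fun acc x => (g x).foldl (fun a y => F a (x, y)) acc) init
      = (l.flatMap (fun x => (g x).map (fun y => (x, y)))).foldl F init := by
  induction l generalizing init with
  | nil => rfl
  | cons h t ih => simp [List.foldl_append, List.foldl_map, ih]

theorem pv_foldl_nested {α β γ : Type} (l : List α) (g : α → List β) (f : γ → β → γ)
    (init : γ) :
    l.foldl (fun acc x => (g x).foldl f acc) init = (l.flatMap g).foldl f init := by
  induction l generalizing init with
  | nil => rfl
  | cons h t ih => simp [List.foldl_append, ih]

theorem pv_foldl_if_max {α : Type} (l : List α) (q : α → Bool) (f : α → Int) (m0 : Int) :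
    m0 ≤ l.foldl (fun m x => if q x then max m (f x) else m) m0
    ∧ (∀ x ∈ l, q x = true → f x ≤ l.foldl (fun m x => if q x then max m (f x) else m) m0)
    ∧ (l.foldl (fun m x => if q x then max m (f x) else m) m0 = m0
         ∨ ∃ x ∈ l, q x = true ∧ l.foldl (fun m x => if q x then max m (f x) else m) m0 = f x) := by
  induction l generalizing m0 with
  | nil => exact ⟨le_refl _, by simp, Or.inl rfl⟩
  | cons h t ih =>
    simp only [List.foldl_cons]
    rcases ih (m0 := if q h then max m0 (f h) else m0) with ⟨h1, h2, h3⟩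
    refine ⟨le_trans ?_ h1, ?_, ?_⟩
    · split_ifs with hq
      · exact le_max_left _ _
      · exact le_refl _
    · intro x hx hqx
      rcases List.mem_cons.mp hx with rfl | hx'
      · refine le_trans ?_ h1
        rw [if_pos hqx]; exact le_max_right _ _
      · exact h2 x hx' hqx
    · rcases h3 with heq | ⟨x, hx, hqx, heq⟩
      · by_cases hq : q h
        · rw [if_pos hq]
          rw [if_pos hq] at heq
          rcases max_choice m0 (f h) with hm | hm
          · exact Or.inl (heq.trans hm)
          · exact Or.inr ⟨h, List.mem_cons_self, hq, heq.trans hm⟩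
        · rw [if_neg hq]
          rw [if_neg hq] at heq
          exact Or.inl heq
      · rw [heq]
        exact Or.inr ⟨x, List.mem_cons_of_mem _ hx, hqx, rfl⟩

-- A-side characterisation
theorem pvA_eq (suspects : List String) :
    maximumFacts suspects =
      ((PySem.List.pyRange 0 ((suspects.map pvSplit).length : Int) 1).flatMap
        (fun i => (PySem.List.pyRange 0 ((suspects.map pvSplit).length : Int) 1).map
          (fun j => (i, j)))).foldl
        (fun m p => if !(p.1 == p.2) then max m (pvC (suspects.map pvSplit) p.1 p.2) else m) 0 := by
  simp only [maximumFacts]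
  rw [← pv_foldl_nested_pair]
  congr 1
  funext most i
  congr 1
  funext m' j
  by_cases hij : i = j
  · simp [hij]
  · simp [hij, pvC, max_def]
    omega

theorem pv_maxD_id_nonneg (xs : List Int) (h : ∀ x ∈ xs, 0 ≤ x) :
    PySem.List.maxD xs (fun v => v) 0 = xs.foldl max 0 := by
  cases xs with
  | nil => rfl
  | cons x t =>
    rw [PySem.List.maxD, PySem.List.max?_id_cons, Option.getD_some, List.foldl_cons,
      max_eq_right (h x List.mem_cons_self)]

theorem pv_sum_ite_eq_countP {α : Type} (l : List α) (P : α → Prop) [DecidablePred P] :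
    (l.map (fun c => if P c then 1 else 0)).sum = l.countP (fun c => decide (P c)) := by
  induction l with
  | nil => rfl
  | cons h t ih =>
    by_cases hp : P h
    · simp [hp, ih]; omega
    · simp [hp, ih]

theorem pv_nodup_filter_beq {α : Type} [DecidableEq α] (l : List α) (hnd : l.Nodup) (c : α) :
    l.filter (· == c) = if c ∈ l then [c] else [] := by
  induction l with
  | nil => rfl
  | cons h t ih =>
    rcases List.nodup_cons.mp hnd with ⟨hh, ht⟩
    by_cases hc : h = c
    · subst hc
      simp [ih ht, hh]
    · simp [hc, ih ht, Ne.symm hc]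

-- occurrence lists
theorem pvOcc_filter (l : List (List String)) (c : String) :
    pvOcc l c = ((PySem.List.enumerate l).filter (fun p => decide (c ∈ p.2))).map (·.1) := by
  unfold pvOcc pvL
  generalize PySem.List.enumerate l = e
  induction e with
  | nil => rfl
  | cons p t ih =>
    simp only [List.flatMap_cons, List.filter_append, List.map_append, ih]
    rw [List.filter_map]
    have hcmp : ((fun q : String × Int => q.1 == c) ∘ (fun f => (f, p.1))) = (· == c) := rfl
    rw [hcmp, pv_nodup_filter_beq _ (PySem.List.nodup_dedup _) c]
    by_cases hc : c ∈ p.2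
    · simp [hc]
    · simp [hc]

theorem pvOcc_pairwise (l : List (List String)) (c : String) :
    (pvOcc l c).Pairwise (· < ·) := by
  rw [pvOcc_filter]
  exact List.pairwise_map.mpr ((PySem.List.pairwise_lt_enumerate l 0).filter _)

theorem pvOcc_mem (l : List (List String)) (c : String) (a : Int) :
    a ∈ pvOcc l c ↔ 0 ≤ a ∧ a < (l.length : Int) ∧ c ∈ PySem.List.pyGetD l a ([] : List String) := by
  rw [pvOcc_filter]
  simp only [List.mem_map, List.mem_filter, PySem.List.mem_enumerate_iff]
  constructor
  · rintro ⟨p, ⟨⟨k, hk, rfl⟩, hc⟩, rfl⟩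
    simp only [zero_add] at *
    refine ⟨by positivity, by exact_mod_cast hk, ?_⟩
    rw [PySem.List.pyGetD_eq_getElem _ _ (by positivity) (by exact_mod_cast hk)]
    simpa using (by simpa using hc : c ∈ l[k])
  · rintro ⟨h0, hlt, hc⟩
    refine ⟨(a, l[a.toNat]'(by omega)), ⟨⟨a.toNat, by omega, by simp [Int.toNat_of_nonneg h0]⟩, ?_⟩, rfl⟩
    rw [PySem.List.pyGetD_eq_getElem _ _ h0 hlt] at hc
    simpa using hc

-- pair lists
theorem pvPairs_mem {idxs : List Int} {p : Int × Int} (hp : p ∈ pvPairs idxs) :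
    p.1 ∈ idxs ∧ p.2 ∈ idxs := by
  induction idxs with
  | nil => simp [pvPairs] at hp
  | cons h t ih =>
    simp only [pvPairs, List.mem_append, List.mem_map] at hp
    rcases hp with ⟨b, hb, rfl⟩ | hp'
    · exact ⟨List.mem_cons_self, List.mem_cons_of_mem _ hb⟩
    · rcases ih hp' with ⟨h1, h2⟩
      exact ⟨List.mem_cons_of_mem _ h1, List.mem_cons_of_mem _ h2⟩

theorem pvPairs_mem_lt {idxs : List Int} (hs : idxs.Pairwise (· < ·)) {p : Int × Int}
    (hp : p ∈ pvPairs idxs) : p.1 < p.2 := by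
  induction idxs with
  | nil => simp [pvPairs] at hp
  | cons h t ih =>
    rcases List.pairwise_cons.mp hs with ⟨hh, ht⟩
    simp only [pvPairs, List.mem_append, List.mem_map] at hp
    rcases hp with ⟨b, hb, rfl⟩ | hp'
    · exact hh b hb
    · exact ih ht hp'

theorem pv_count_map_pair (t : List Int) (h a b : Int) :
    (t.map (fun x => (h, x))).count (a, b) = if a = h then t.count b else 0 := by
  by_cases hah : a = h
  · subst hah
    rw [List.count_eq_countP, List.countP_map, List.count_eq_countP, if_pos rfl]
    apply List.countP_congr
    intro x _
    simp [Function.comp, Prod.ext_iff]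
  · rw [List.count_eq_zero_of_not_mem, if_neg hah]
    simp only [List.mem_map, not_exists]
    rintro x ⟨hx, heq⟩
    have hfst : h = a := by simpa using congrArg Prod.fst heq
    exact hah hfst.symm

theorem pvPairs_count (idxs : List Int) (h : idxs.Pairwise (· < ·)) (a b : Int) :
    (pvPairs idxs).count (a, b) = if a ∈ idxs ∧ b ∈ idxs ∧ a < b then 1 else 0 := by
  induction idxs with
  | nil => simp [pvPairs]
  | cons hd t ih =>
    rcases List.pairwise_cons.mp h with ⟨hh, ht⟩
    have hnd : t.Nodup := ht.nodup
    have hhd : hd ∉ t := fun hmem => lt_irrefl hd (hh hd hmem)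
    rw [pvPairs, List.count_append, pv_count_map_pair, ih ht]
    by_cases hah : a = hd
    · subst hah
      rw [if_pos rfl]
      have h2 : ¬ (a ∈ t ∧ b ∈ t ∧ a < b) := fun ⟨h1, _, _⟩ => hhd h1
      rw [if_neg h2]
      by_cases hbt : b ∈ t
      · rw [List.count_eq_one_of_mem hnd hbt,
          if_pos ⟨List.mem_cons_self, List.mem_cons_of_mem _ hbt, hh b hbt⟩]
      · rw [List.count_eq_zero_of_not_mem hbt, if_neg]
        rintro ⟨-, hb, hab⟩
        rcases List.mem_cons.mp hb with rfl | hb'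
        · exact lt_irrefl _ hab
        · exact hbt hb'
    · rw [if_neg hah, zero_add]
      congr 1
      apply propext
      constructor
      · rintro ⟨h1, h2, h3⟩
        exact ⟨List.mem_cons_of_mem _ h1, List.mem_cons_of_mem _ h2, h3⟩
      · rintro ⟨h1, h2, h3⟩
        rcases List.mem_cons.mp h1 with rfl | h1'
        · exact absurd rfl hah
        · rcases List.mem_cons.mp h2 with rfl | h2'
          · exact absurd (hh a h1') (not_lt.mpr h3.le)
          · exact ⟨h1', h2', h3⟩

def pvNPairs (idxs : List Int) : List (Int × Int) :=
  (List.range idxs.length).flatMap (fun k =>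
    (List.range (idxs.length - k - 1)).map (fun j => (idxs.getD k 0, idxs.getD (k + 1 + j) 0)))

theorem pv_map_range_getD {α : Type} [Inhabited α] (t : List α) (d : α) :
    (List.range t.length).map (fun j => t.getD j d) = t := by
  apply List.ext_getElem
  · simp
  · intro i h1 h2
    simp [List.getElem?_eq_getElem h2]

theorem pvNPairs_eq (idxs : List Int) : pvNPairs idxs = pvPairs idxs := by
  induction idxs with
  | nil => rfl
  | cons h t ih =>
    unfold pvNPairs pvPairs
    rw [List.length_cons, List.range_succ_eq_map, List.flatMap_cons]
    congr 1
    · have hsh : ∀ j : Nat, (h :: t).getD (0 + 1 + j) 0 = t.getD j 0 := by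
        intro j; rw [Nat.zero_add, Nat.add_comm 1 j, List.getD_cons_succ]
      simp only [List.getD_cons_zero, hsh, Nat.add_sub_cancel, Nat.sub_zero]
      conv_rhs => rw [← pv_map_range_getD t 0]
      rw [List.map_map]
      rfl
    · rw [List.flatMap_map, ← ih]
      unfold pvNPairs
      congr 1
      funext k
      rw [show t.length + 1 - Nat.succ k - 1 = t.length - k - 1 from by omega]
      apply List.map_congr_left
      intro j _
      rw [show Nat.succ k + 1 + j = (k + 1 + j) + 1 from by omega,
        show Nat.succ k = k + 1 from rfl, List.getD_cons_succ, List.getD_cons_succ]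

-- the inner double loop of B enumerates exactly pvPairs idxs
theorem pv_pairKeys (idxs : List Int) :
    ((PySem.List.pyRange 0 (idxs.length : Int) 1).flatMap
      (fun x => (PySem.List.pyRange (x + 1) (idxs.length : Int) 1).map (fun y => (x, y)))).map
      (fun p => (PySem.List.pyGetD idxs p.1 0, PySem.List.pyGetD idxs p.2 0)) = pvPairs idxs := by
  rw [← pvNPairs_eq, List.map_flatMap, PySem.List.pyRange_zero_nat, List.flatMap_map]
  unfold pvNPairs
  apply List.flatMap_congr
  intro k hk
  rw [List.map_map, PySem.List.pyRange_one,
    show ((idxs.length : Int) - ((k : Int) + 1)).toNat = idxs.length - k - 1 from by omega,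
    List.map_map]
  apply List.map_congr_left
  intro j _
  show (PySem.List.pyGetD idxs (k : Int) 0, PySem.List.pyGetD idxs ((k : Int) + 1 + (j : Int)) 0)
      = (idxs.getD k 0, idxs.getD (k + 1 + j) 0)
  have h2 : PySem.List.pyGetD idxs ((k : Int) + 1 + (j : Int)) 0 = idxs.getD (k + 1 + j) 0 := by
    rw [show ((k : Int) + 1 + (j : Int)) = ((k + 1 + j : Nat) : Int) from by push_cast; ring]
    exact PySem.List.pyGetD_natCast idxs (k + 1 + j) 0
  rw [h2, PySem.List.pyGetD_natCast]

-- B-side characterisation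
theorem pvB_eq (suspects : List String) :
    maximumFacts_alt suspects =
      PySem.List.maxD ((PySem.Set.ofList (pvK (suspects.map pvSplit))).map
        (fun k => ((pvK (suspects.map pvSplit)).count k : Int))) (fun v => v) 0 := by
  simp only [maximumFacts_alt]
  have hidx : (PySem.List.enumerate (suspects.map pvSplit)).foldl
      (fun d p => (PySem.List.dedup p.2).foldl (fun d fact => d.modify fact [] (fun l => l ++ [p.1])) d)
      PySem.Dict.empty
    = (pvL (suspects.map pvSplit)).foldl (fun d q => d.modify q.1 [] (fun l => l ++ [q.2]))
        PySem.Dict.empty := by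
    rw [pv_foldl_nested_pair (F := fun (d : PySem.Dict String (List Int))
      (pr : (Int × List String) × String) => d.modify pr.2 [] (fun l => l ++ [pr.1.1]))]
    have hmap : pvL (suspects.map pvSplit) = ((PySem.List.enumerate (suspects.map pvSplit)).flatMap
        (fun p => (PySem.List.dedup p.2).map (fun y => (p, y)))).map (fun pr => (pr.2, pr.1.1)) := by
      unfold pvL
      rw [List.map_flatMap]
      apply List.flatMap_congr
      intro p _
      rw [List.map_map]
      rfl
    rw [hmap, List.foldl_map]
  rw [hidx]
  have hkeys : ((pvL (suspects.map pvSplit)).foldl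
      (fun d q => d.modify q.1 [] (fun l => l ++ [q.2])) PySem.Dict.empty).keys
      = PySem.Set.ofList ((pvL (suspects.map pvSplit)).map (fun q => q.1)) := by
    rw [PySem.Dict.keys_foldl_modify_key (pvL (suspects.map pvSplit)) (fun q => q.1) []
      (fun _ q => fun l => l ++ [q.2]) PySem.Dict.empty]
    simp [PySem.Set.update_nil_left]
  have hgetD : forall c, ((pvL (suspects.map pvSplit)).foldl
      (fun d q => d.modify q.1 [] (fun l => l ++ [q.2])) PySem.Dict.empty).getD c []
      = pvOcc (suspects.map pvSplit) c := by
    intro c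
    rw [PySem.Dict.getD_foldl_modify_append]
    simp [pvOcc]
  have hone : forall (cd : PySem.Dict (Int × Int) Int) (fact : String),
      (PySem.List.pyRange 0
        ((((pvL (suspects.map pvSplit)).foldl (fun d q => d.modify q.1 [] (fun l => l ++ [q.2]))
          PySem.Dict.empty).getD fact []).length : Int) 1).foldl (fun cdict x =>
        (PySem.List.pyRange (x + 1)
          ((((pvL (suspects.map pvSplit)).foldl (fun d q => d.modify q.1 [] (fun l => l ++ [q.2]))
            PySem.Dict.empty).getD fact []).length : Int) 1).foldl (fun cdict y =>
          cdict.modify (PySem.List.pyGetD (((pvL (suspects.map pvSplit)).foldl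
              (fun d q => d.modify q.1 [] (fun l => l ++ [q.2])) PySem.Dict.empty).getD fact []) x 0,
            PySem.List.pyGetD (((pvL (suspects.map pvSplit)).foldl
              (fun d q => d.modify q.1 [] (fun l => l ++ [q.2])) PySem.Dict.empty).getD fact []) y 0)
            0 (fun v => v + 1)) cdict) cd
      = (pvPairs (pvOcc (suspects.map pvSplit) fact)).foldl
          (fun cd k => cd.modify k 0 (fun v => v + 1)) cd := by
    intro cd fact
    rw [hgetD fact]
    rw [pv_foldl_nested_pair (F := fun (cd : PySem.Dict (Int × Int) Int) (p : Int × Int) =>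
      cd.modify (PySem.List.pyGetD (pvOcc (suspects.map pvSplit) fact) p.1 0,
        PySem.List.pyGetD (pvOcc (suspects.map pvSplit) fact) p.2 0) 0 (fun v => v + 1))]
    rw [← pv_pairKeys (pvOcc (suspects.map pvSplit) fact), List.foldl_map]
  rw [hkeys]
  simp only [hone]
  rw [pv_foldl_nested (f := fun (cd : PySem.Dict (Int × Int) Int) (k : Int × Int) =>
    cd.modify k 0 (fun v => v + 1))]
  rw [← PySem.Dict.counter_eq_foldl]
  show PySem.List.maxD (PySem.Dict.values (PySem.Dict.counter (pvK (suspects.map pvSplit)))) _ _ = _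
  rw [PySem.Dict.values, PySem.Dict.items_counter, List.map_map]
  rfl


-- count of a pair in pvK
theorem pv_count_flatMap {α β : Type} [BEq β] (l : List α) (g : α → List β) (v : β) :
    (l.flatMap g).count v = (l.map (fun x => (g x).count v)).sum := by
  induction l with
  | nil => rfl
  | cons h t ih => simp [List.count_append, ih]

theorem pvK_mem (l : List (List String)) {p : Int × Int} (hp : p ∈ pvK l) :
    0 ≤ p.1 ∧ p.1 < (l.length : Int) ∧ 0 ≤ p.2 ∧ p.2 < (l.length : Int) ∧ p.1 < p.2 := by
  unfold pvK at hp
  rcases List.mem_flatMap.mp hp with ⟨c, hc, hpc⟩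
  rcases pvPairs_mem hpc with ⟨h1, h2⟩
  have hlt := pvPairs_mem_lt (pvOcc_pairwise l c) hpc
  rcases (pvOcc_mem l c p.1).mp h1 with ⟨a0, a1, -⟩
  rcases (pvOcc_mem l c p.2).mp h2 with ⟨b0, b1, -⟩
  exact ⟨a0, a1, b0, b1, hlt⟩

theorem pvK_count (l : List (List String)) (a b : Int)
    (ha0 : 0 ≤ a) (ha : a < (l.length : Int)) (hb0 : 0 ≤ b) (hb : b < (l.length : Int))
    (hab : a < b) :
    ((pvK l).count (a, b) : Int) = pvC l a b := by
  unfold pvK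
  rw [pv_count_flatMap]
  have hterm : ∀ c, (pvPairs (pvOcc l c)).count (a, b)
      = if c ∈ PySem.List.pyGetD l a ([] : List String)
          ∧ c ∈ PySem.List.pyGetD l b ([] : List String) then 1 else 0 := by
    intro c
    rw [pvPairs_count _ (pvOcc_pairwise l c)]
    congr 1
    apply propext
    rw [pvOcc_mem, pvOcc_mem]
    constructor
    · rintro ⟨⟨-, -, h1⟩, ⟨-, -, h2⟩, -⟩; exact ⟨h1, h2⟩
    · rintro ⟨h1, h2⟩; exact ⟨⟨ha0, ha, h1⟩, ⟨hb0, hb, h2⟩, hab⟩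
  rw [List.map_congr_left (fun c _ => hterm c), pv_sum_ite_eq_countP]
  rw [List.countP_eq_length_filter]
  unfold pvC
  show (((PySem.Set.ofList ((pvL l).map (·.1))).filter
      (fun c => decide (c ∈ PySem.List.pyGetD l a ([] : List String)
        ∧ c ∈ PySem.List.pyGetD l b ([] : List String)))).length : Int) = _
  have hsub : ∀ x : String, x ∈ PySem.List.pyGetD l a ([] : List String) →
      x ∈ (pvL l).map (fun q : String × Int => q.1) := by
    intro x hx
    rw [PySem.List.pyGetD_eq_getElem _ _ ha0 ha] at hx
    simp only [pvL, List.mem_map, List.mem_flatMap, PySem.List.mem_enumerate_iff]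
    refine ⟨(x, a), ⟨((a : Int), l[a.toNat]'(by omega)), ⟨a.toNat, by omega, by
      simp [Int.toNat_of_nonneg ha0]⟩, ?_⟩, rfl⟩
    exact ⟨x, (PySem.List.mem_dedup _ _).mpr hx, by simp⟩
  have hnd1 : ((PySem.Set.ofList ((pvL l).map (·.1))).filter
      (fun c => decide (c ∈ PySem.List.pyGetD l a ([] : List String)
        ∧ c ∈ PySem.List.pyGetD l b ([] : List String)))).Nodup :=
    (PySem.Set.nodup_ofList _).filter _
  have hnd2 : (PySem.Set.inter
      (PySem.Set.ofList (PySem.List.pyGetD l a ([] : List String)))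
      (PySem.Set.ofList (PySem.List.pyGetD l b ([] : List String)))).Nodup :=
    (PySem.Set.nodup_ofList _).filter _
  have hperm := (List.perm_ext_iff_of_nodup hnd1 hnd2).mpr ?_
  · rw [hperm.length_eq]
  · intro x
    simp only [List.mem_filter, PySem.Set.mem_ofList, PySem.Set.inter,
      PySem.Set.contains_eq_listContains, List.contains_iff_mem, decide_eq_true_eq]
    constructor
    · rintro ⟨-, h1, h2⟩
      exact ⟨h1, h2⟩
    · rintro ⟨h1, h2⟩
      exact ⟨hsub x h1, h1, h2⟩

theorem pvC_symm (l : List (List String)) (i j : Int) : pvC l i j = pvC l j i := by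
  unfold pvC
  congr 1
  have hnd1 : (PySem.Set.inter (PySem.Set.ofList (PySem.List.pyGetD l i ([] : List String)))
      (PySem.Set.ofList (PySem.List.pyGetD l j ([] : List String)))).Nodup :=
    (PySem.Set.nodup_ofList _).filter _
  have hnd2 : (PySem.Set.inter (PySem.Set.ofList (PySem.List.pyGetD l j ([] : List String)))
      (PySem.Set.ofList (PySem.List.pyGetD l i ([] : List String)))).Nodup :=
    (PySem.Set.nodup_ofList _).filter _
  have hperm := (List.perm_ext_iff_of_nodup hnd1 hnd2).mpr ?_
  · rw [hperm.length_eq]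
  · intro x
    simp only [PySem.Set.inter, List.mem_filter, PySem.Set.mem_ofList,
      PySem.Set.contains_eq_listContains, List.contains_iff_mem]
    tauto

-- ===== VERDICT (by name: the statement is the Claim_ definition above) =====
theorem maximumFacts_spec : Claim_equal_maximumFacts := by
  intro suspects _
  show maximumFacts suspects = maximumFacts_alt suspects
  rw [pvA_eq, pvB_eq]
  rw [pv_maxD_id_nonneg _ (by
    intro x hx
    rcases List.mem_map.mp hx with ⟨k, -, rfl⟩
    positivity)]
  rw [List.foldl_map]
  have hif : (fun (m : Int) (k : Int × Int) =>
      max m (((pvK (suspects.map pvSplit)).count k : Int)))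
      = (fun m k => if (fun (_ : Int × Int) => true) k then
          max m (((pvK (suspects.map pvSplit)).count k : Int)) else m) := by
    funext m k; simp
  rw [hif]
  obtain ⟨hA0, hAub, hAmem⟩ := pv_foldl_if_max
    ((PySem.List.pyRange 0 (((suspects.map pvSplit)).length : Int) 1).flatMap
      (fun i => (PySem.List.pyRange 0 (((suspects.map pvSplit)).length : Int) 1).map
        (fun j => (i, j))))
    (fun p => !(p.1 == p.2)) (fun p => pvC (suspects.map pvSplit) p.1 p.2) 0
  obtain ⟨hB0, hBub, hBmem⟩ := pv_foldl_if_max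
    (PySem.Set.ofList (pvK (suspects.map pvSplit)))
    (fun _ => true) (fun k => ((pvK (suspects.map pvSplit)).count k : Int)) 0
  have hPmem : ∀ p : Int × Int,
      p ∈ ((PySem.List.pyRange 0 (((suspects.map pvSplit)).length : Int) 1).flatMap
        (fun i => (PySem.List.pyRange 0 (((suspects.map pvSplit)).length : Int) 1).map
          (fun j => (i, j))))
      ↔ (0 ≤ p.1 ∧ p.1 < ((suspects.map pvSplit).length : Int)
          ∧ 0 ≤ p.2 ∧ p.2 < ((suspects.map pvSplit).length : Int)) := by
    intro p
    constructor
    · intro hp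
      rcases List.mem_flatMap.mp hp with ⟨i, hi, hpi⟩
      rcases List.mem_map.mp hpi with ⟨j, hj, rfl⟩
      rcases PySem.List.mem_pyRange_one.mp hi with ⟨hi1, hi2⟩
      rcases PySem.List.mem_pyRange_one.mp hj with ⟨hj1, hj2⟩
      exact ⟨hi1, hi2, hj1, hj2⟩
    · rintro ⟨h1, h2, h3, h4⟩
      exact List.mem_flatMap.mpr ⟨p.1, PySem.List.mem_pyRange_one.mpr ⟨h1, h2⟩,
        List.mem_map.mpr ⟨p.2, PySem.List.mem_pyRange_one.mpr ⟨h3, h4⟩, rfl⟩⟩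
  apply le_antisymm
  · rcases hAmem with h0 | ⟨p, hp, hq, heq⟩
    · rw [h0]; exact hB0
    · rw [heq]
      rcases (hPmem p).mp hp with ⟨h1, h2, h3, h4⟩
      have hne : p.1 ≠ p.2 := by simpa using hq
      rcases lt_or_gt_of_ne hne with hlt | hgt
      · by_cases hz : pvC (suspects.map pvSplit) p.1 p.2 ≤ 0
        · exact le_trans hz hB0
        · rw [not_le] at hz
          have hcnt := pvK_count (suspects.map pvSplit) p.1 p.2 h1 h2 h3 h4 hlt
          have hpos : 0 < (pvK (suspects.map pvSplit)).count (p.1, p.2) := by omega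
          have hmem := (PySem.Set.mem_ofList _ _).mpr (List.count_pos_iff.mp hpos)
          have := hBub (p.1, p.2) hmem rfl
          rw [← hcnt]
          simpa using this
      · by_cases hz : pvC (suspects.map pvSplit) p.1 p.2 ≤ 0
        · exact le_trans hz hB0
        · rw [not_le] at hz
          have hsymm := pvC_symm (suspects.map pvSplit) p.1 p.2
          have hcnt := pvK_count (suspects.map pvSplit) p.2 p.1 h3 h4 h1 h2 hgt
          rw [← hsymm] at hcnt
          have hpos : 0 < (pvK (suspects.map pvSplit)).count (p.2, p.1) := by omega
          have hmem := (PySem.Set.mem_ofList _ _).mpr (List.count_pos_iff.mp hpos)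
          have := hBub (p.2, p.1) hmem rfl
          rw [← hcnt]
          simpa using this
  · rcases hBmem with h0 | ⟨k, hk, -, heq⟩
    · rw [h0]; exact hA0
    · rw [heq]
      have hkK := (PySem.Set.mem_ofList _ _).mp hk
      obtain ⟨k10, k1n, k20, k2n, klt⟩ := pvK_mem (suspects.map pvSplit) hkK
      have hcnt := pvK_count (suspects.map pvSplit) k.1 k.2 k10 k1n k20 k2n klt
      rw [show ((k.1, k.2) : Int × Int) = k from rfl] at hcnt
      rw [hcnt]
      exact hAub k ((hPmem k).mpr ⟨k10, k1n, k20, k2n⟩) (by simp; omega)
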